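-- pv_equiv track=rewrite | github.com/hars-21/skillyug | recommendation-engine-fastapi/app/services/data_ingestion.py | _fallback_split
-- ===== SOURCE A (Python) =====
-- from typing import List, Dict, Any, Optional
--
-- def _fallback_split(text: str) -> List[str]:
--     """Fallback method to split text when patterns don't match."""
--     # Split by paragraphs and group them
--     paragraphs = [p.strip() for p in text.split('\n\n') if p.strip()]
--
--     # Group paragraphs into course sections (simple heuristic)
--     sections = []
--     current_section = ""
--
--     for para in paragraphs:
--         if len(para) > 200 and any(keyword in para.lower() for keyword in ['course', 'learn', 'master', 'beginner', 'advanced']):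
--             if current_section:
--                 sections.append(current_section)
--             current_section = para
--         else:
--             current_section += "\n\n" + para if current_section else para
--
--     if current_section:
--         sections.append(current_section)
--
--     return sections
-- ===== SOURCE B (Python) =====
-- def _fallback_split(text):
--     """Different decomposition: one reverse pass building a list of paragraph
--     groups back-to-front (a header paragraph closes the group it starts),
--     then join each group with '\n\n'."""
--     paragraphs = [p.strip() for p in text.split('\n\n') if p.strip()]
--     keywords = ['course', 'learn', 'master', 'beginner', 'advanced']
--
--     def is_header(p):
--         return len(p) > 200 and any(k in p.lower() for k in keywords)
--
--     groups = []
--     cur = []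
--     for para in reversed(paragraphs):
--         cur = [para] + cur
--         if is_header(para):
--             groups = [cur] + groups
--             cur = []
--     if cur:
--         groups = [cur] + groups
--     return ['\n\n'.join(g) for g in groups]
-- ===== Notes on version B (the rewrite author's own statement) =====
-- stated objective: alternative
-- what changed: A's forward pass over the paragraphs mutates a growing string accumulator and flushes it into the section list at each header; B instead makes one reverse pass building the list of paragraph groups back-to-front (a header paragraph closes the group it starts) and joins each group with the blank-line separator at the end.
import Mathlib
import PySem

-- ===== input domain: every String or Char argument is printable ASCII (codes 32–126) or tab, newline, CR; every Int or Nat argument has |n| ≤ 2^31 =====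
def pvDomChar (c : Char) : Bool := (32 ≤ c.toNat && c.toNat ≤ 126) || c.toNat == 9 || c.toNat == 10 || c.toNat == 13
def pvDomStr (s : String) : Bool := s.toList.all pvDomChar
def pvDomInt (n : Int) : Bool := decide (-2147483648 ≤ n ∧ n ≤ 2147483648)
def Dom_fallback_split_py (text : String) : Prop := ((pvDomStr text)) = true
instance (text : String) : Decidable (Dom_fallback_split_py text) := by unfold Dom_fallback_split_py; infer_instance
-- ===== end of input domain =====

-- B replaces A's forward pass with a string accumulator and flushes by a single
-- reverse pass building the list of paragraph GROUPS back-to-front (a header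
-- paragraph closes the group it starts), joining each group at the end
-- (objective: alternative decomposition, same cost).

-- ===== PORT A =====
-- the paragraph list: [p.strip() for p in text.split('\n\n') if p.strip()]
-- (split? is some for the nonempty separator '\n\n'; getD is never taken on none)
def pvParagraphs (text : String) : List String :=
  (((PySem.Str.split? text "\n\n").getD []).map PySem.Str.strip).filter
    (fun s => decide (s ≠ ""))

-- len(para) > 200 and any(keyword in para.lower() for keyword in [...])
def pvIsHeaderA (para : String) : Bool :=
  decide (200 < PySem.Str.len para) &&
    (["course", "learn", "master", "beginner", "advanced"].any
      (fun k => PySem.Str.isIn k (PySem.Str.lower para)))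

def fallback_split_py (text : String) : List String :=
  let paragraphs := pvParagraphs text
  let st := paragraphs.foldl
    (fun (st : List String × String) para =>
      if pvIsHeaderA para then
        (if st.2 ≠ "" then st.1 ++ [st.2] else st.1, para)
      else
        (st.1, if st.2 ≠ "" then st.2 ++ "\n\n" ++ para else para))
    ([], "")
  if st.2 ≠ "" then st.1 ++ [st.2] else st.1

-- ===== PORT B =====
-- Source B's is_header helper (same predicate text as A's inline condition)
def pvIsHeaderB (p : String) : Bool :=
  decide (200 < PySem.Str.len p) &&
    (["course", "learn", "master", "beginner", "advanced"].any
      (fun k => PySem.Str.isIn k (PySem.Str.lower p)))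

def fallback_split_py_alt (text : String) : List String :=
  let paragraphs := pvParagraphs text
  -- 'for para in reversed(paragraphs)' with state (groups, cur) is a foldr
  let st := paragraphs.foldr
    (fun para (st : List (List String) × List String) =>
      let cur' := para :: st.2
      if pvIsHeaderB para then (cur' :: st.1, []) else (st.1, cur'))
    ([], [])
  let groups := if st.2 ≠ [] then st.2 :: st.1 else st.1
  groups.map (fun g => PySem.Str.join "\n\n" g)

-- ===== PRECONDITION & SPEC =====
def Spec_fallback_split_py (text : String) (out : List String) : Prop := out = fallback_split_py_alt text
instance (text : String) (out : List String) : Decidable (Spec_fallback_split_py text out) := by unfold Spec_fallback_split_py; infer_instance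

-- ===== CLAIM (what is proved, stated in full; the proofs are below) =====
def Claim_equal_fallback_split_py : Prop := ∀ (text : String), Dom_fallback_split_py text → Spec_fallback_split_py text (fallback_split_py text)

-- ===== LEMMAS AND PROOFS =====

-- abbreviations for the two ports' loop bodies and finishers
def pvStepA (st : List String × String) (para : String) : List String × String :=
  if pvIsHeaderA para then
    (if st.2 ≠ "" then st.1 ++ [st.2] else st.1, para)
  else
    (st.1, if st.2 ≠ "" then st.2 ++ "\n\n" ++ para else para)

def pvStepB (para : String) (st : List (List String) × List String) :
    List (List String) × List String :=
  let cur' := para :: st.2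
  if pvIsHeaderB para then (cur' :: st.1, []) else (st.1, cur')

-- proof-side grouping function: the common meaning of both loops
def pvGo (acc : List String) : List String → List (List String)
  | [] => [acc]
  | q :: qs => if pvIsHeaderA q then acc :: pvGo [q] qs else pvGo (acc ++ [q]) qs

def pvJ (g : List String) : String := PySem.Str.join "\n\n" g

theorem pvHeaderAB : pvIsHeaderB = pvIsHeaderA := rfl

theorem pvHeader_ne_empty {q : String} (h : pvIsHeaderA q = true) : q ≠ "" := by
  intro he
  subst he
  simp [pvIsHeaderA, PySem.Str.len] at h

theorem pvJ_singleton (q : String) : pvJ [q] = q := by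
  apply String.toList_inj.mp
  simp [pvJ, PySem.Str.toList_join, PySem.Chars.join_singleton]

theorem pvChars_join_snoc (sep : List Char) (l : List (List Char)) (q : List Char)
    (h : l ≠ []) :
    PySem.Chars.join sep (l ++ [q]) = PySem.Chars.join sep l ++ sep ++ q := by
  induction l with
  | nil => exact absurd rfl h
  | cons a as ih =>
    cases as with
    | nil => simp [PySem.Chars.join_singleton, PySem.Chars.join_cons_cons]
    | cons b bs =>
      have := ih (by simp)
      simp only [List.cons_append, PySem.Chars.join_cons_cons] at this ⊢
      simp [this]

theorem pvJ_snoc (acc : List String) (q : String) (h : acc ≠ []) :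
    pvJ (acc ++ [q]) = pvJ acc ++ "\n\n" ++ q := by
  apply String.toList_inj.mp
  simp only [pvJ, PySem.Str.toList_join, String.toList_append, List.map_append,
    List.map_cons, List.map_nil]
  exact pvChars_join_snoc _ _ _ (by simpa using h)

theorem pvJ_snoc_ne (acc : List String) (q : String) (hacc : acc ≠ []) :
    pvJ (acc ++ [q]) ≠ "" := by
  rw [pvJ_snoc acc q hacc]
  intro he
  have : (pvJ acc ++ "\n\n" ++ q).toList = ("" : String).toList := by rw [he]
  simp [String.toList_append] at this

-- B's foldr computes (completed groups, the pending prefix group); pvGo glues them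
theorem pvFoldrB_go (ps : List String) (acc : List String) :
    pvGo acc ps = (acc ++ (ps.foldr pvStepB ([], [])).2) :: (ps.foldr pvStepB ([], [])).1 := by
  induction ps generalizing acc with
  | nil => simp [pvGo]
  | cons q qs ih =>
    simp only [List.foldr_cons]
    by_cases hq : pvIsHeaderA q
    · simp only [pvGo, hq, if_pos, pvStepB, pvHeaderAB]
      rw [ih [q]]
      simp
    · simp only [pvGo, hq, pvStepB, pvHeaderAB]
      rw [ih (acc ++ [q])]
      simp

-- A's foldl with a nonempty accumulated string computes the joined groups
theorem pvFoldlA_go (ps : List String) (S : List String) (acc : List String)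
    (hacc : acc ≠ []) (hJ : pvJ acc ≠ "") :
    (let st := ps.foldl pvStepA (S, pvJ acc)
     if st.2 ≠ "" then st.1 ++ [st.2] else st.1) = S ++ (pvGo acc ps).map pvJ := by
  induction ps generalizing S acc with
  | nil => simp [pvGo, hJ]
  | cons q qs ih =>
    simp only [List.foldl_cons]
    by_cases hq : pvIsHeaderA q
    · have hstep : pvStepA (S, pvJ acc) q = (S ++ [pvJ acc], pvJ [q]) := by
        simp [pvStepA, hq, hJ, pvJ_singleton]
      rw [hstep, ih (S ++ [pvJ acc]) [q] (by simp)
        (by rw [pvJ_singleton]; exact pvHeader_ne_empty hq)]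
      simp [pvGo, hq]
    · have hstep : pvStepA (S, pvJ acc) q = (S, pvJ (acc ++ [q])) := by
        simp [pvStepA, hq, hJ, pvJ_snoc acc q hacc]
      rw [hstep, ih S (acc ++ [q]) (by simp) (pvJ_snoc_ne acc q hacc)]
      simp [pvGo, hq]

-- the first loop iteration of A: from ("", []) the state becomes ([], p)
theorem pvStepA_init (p : String) : pvStepA ([], "") p = ([], p) := by
  by_cases hp : pvIsHeaderA p <;> simp [pvStepA, hp]

theorem pvPara_head_ne {text : String} {p : String} {tl : List String}
    (h : pvParagraphs text = p :: tl) : p ≠ "" := by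
  have hmem : p ∈ pvParagraphs text := by rw [h]; exact List.mem_cons_self
  unfold pvParagraphs at hmem
  have := List.of_mem_filter hmem
  simpa using this

-- ===== VERDICT (by name: the statement is the Claim_ definition above) =====
theorem fallback_split_py_spec : Claim_equal_fallback_split_py := by
  intro text _
  unfold Spec_fallback_split_py fallback_split_py fallback_split_py_alt
  cases hps : pvParagraphs text with
  | nil => simp
  | cons p tl =>
    have hp : p ≠ "" := pvPara_head_ne hps
    simp only []
    -- A side
    have hA : (let st := (p :: tl).foldl (fun (st : List String × String) para =>
          if pvIsHeaderA para then
            (if st.2 ≠ "" then st.1 ++ [st.2] else st.1, para)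
          else
            (st.1, if st.2 ≠ "" then st.2 ++ "\n\n" ++ para else para)) ([], "")
        if st.2 ≠ "" then st.1 ++ [st.2] else st.1) = (pvGo [p] tl).map pvJ := by
      show (let st := (p :: tl).foldl pvStepA ([], "")
        if st.2 ≠ "" then st.1 ++ [st.2] else st.1) = (pvGo [p] tl).map pvJ
      rw [List.foldl_cons, pvStepA_init]
      have := pvFoldlA_go tl [] [p] (by simp) (by rw [pvJ_singleton]; exact hp)
      rw [pvJ_singleton] at this
      simpa using this
    -- B side
    have hB : (let st := (p :: tl).foldr (fun para (st : List (List String) × List String) =>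
          let cur' := para :: st.2
          if pvIsHeaderB para then (cur' :: st.1, []) else (st.1, cur')) ([], [])
        let groups := if st.2 ≠ [] then st.2 :: st.1 else st.1
        groups.map (fun g => PySem.Str.join "\n\n" g)) = (pvGo [p] tl).map pvJ := by
      show (let st := (p :: tl).foldr pvStepB ([], [])
        let groups := if st.2 ≠ [] then st.2 :: st.1 else st.1
        groups.map (fun g => PySem.Str.join "\n\n" g)) = (pvGo [p] tl).map pvJ
      rw [List.foldr_cons]
      rw [pvFoldrB_go tl [p]]
      by_cases hq : pvIsHeaderA p <;>
        simp [pvStepB, pvHeaderAB, hq, pvJ]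
    rw [hps] at *
    rw [hA, hB]
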